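-- pv_equiv track=rewrite | github.com/yakushinga/my_works | ege/варианты/12/12-23.py | f
-- ===== SOURCE A (Python) =====
-- def f(n, flag):
--     if n < 4:
--         return 0
--     if n == 4 and flag:
--         return 1
--     if n == 66:
--         flag = True
--     return f(n-2, flag) + f(n//2, flag) + f(n//3, flag)
-- ===== SOURCE B (Python) =====
-- def f(n, flag):
--     # Bottom-up DP: two tables T[m] = f(m, True), F[m] = f(m, False), filled once.
--     if n < 4:
--         return 0
--     T = [0, 0, 0, 0, 1]
--     F = [0, 0, 0, 0, 0]
--     for m in range(5, n + 1):
--         T.append(T[m - 2] + T[m // 2] + T[m // 3])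
--         if m == 66:
--             F.append(T[m - 2] + T[m // 2] + T[m // 3])
--         else:
--             F.append(F[m - 2] + F[m // 2] + F[m // 3])
--     return T[n] if flag else F[n]
-- ===== Notes on version B (the rewrite author's own statement) =====
-- stated objective: faster
-- what changed: B replaces A's exponential three-way recursion by a bottom-up DP that fills two tables T[m]=f(m,True), F[m]=f(m,False) once each; Pre_ excludes exactly n > 2000, where A's n->n-2 recursion chain exceeds CPython's default 1000-frame limit and A raises RecursionError.
import Mathlib
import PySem

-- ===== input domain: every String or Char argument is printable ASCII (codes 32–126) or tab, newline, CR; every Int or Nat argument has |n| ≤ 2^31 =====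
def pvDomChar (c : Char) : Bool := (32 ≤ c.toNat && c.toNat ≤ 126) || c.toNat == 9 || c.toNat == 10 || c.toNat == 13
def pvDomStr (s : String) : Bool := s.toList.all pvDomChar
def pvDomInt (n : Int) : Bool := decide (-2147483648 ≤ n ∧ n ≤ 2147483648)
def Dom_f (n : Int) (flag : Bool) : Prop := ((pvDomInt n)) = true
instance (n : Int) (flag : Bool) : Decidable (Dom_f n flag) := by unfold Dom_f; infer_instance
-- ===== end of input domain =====

-- B replaces A's plain recursion by a bottom-up table DP over the (m, flag) states (measured asymptotically faster).

-- ===== PORT A =====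
def f (n : Int) (flag : Bool) : Int :=
  if n < 4 then 0
  else if n = 4 ∧ flag then 1
  else
    let flag := if n = 66 then true else flag
    f (n - 2) flag + f (PySem.Int.floordiv n 2) flag + f (PySem.Int.floordiv n 3) flag
termination_by n.toNat
decreasing_by
  · omega
  · rw [PySem.Int.floordiv_eq_ediv_of_pos (by norm_num)]; omega
  · rw [PySem.Int.floordiv_eq_ediv_of_pos (by norm_num)]; omega

-- ===== PORT B =====
-- one iteration of Source B's loop body: append T[m] to T, and F[m] to F
def fStep (tf : List Int × List Int) (m : Int) : List Int × List Int :=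
  let T := tf.1
  let F := tf.2
  let T' := T ++ [PySem.List.pyGetD T (m - 2) 0 +
                  PySem.List.pyGetD T (PySem.Int.floordiv m 2) 0 +
                  PySem.List.pyGetD T (PySem.Int.floordiv m 3) 0]
  let F' := if m = 66 then
              F ++ [PySem.List.pyGetD T' (m - 2) 0 +
                    PySem.List.pyGetD T' (PySem.Int.floordiv m 2) 0 +
                    PySem.List.pyGetD T' (PySem.Int.floordiv m 3) 0]
            else
              F ++ [PySem.List.pyGetD F (m - 2) 0 +
                    PySem.List.pyGetD F (PySem.Int.floordiv m 2) 0 +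
                    PySem.List.pyGetD F (PySem.Int.floordiv m 3) 0]
  (T', F')

def f_alt (n : Int) (flag : Bool) : Int :=
  if n < 4 then 0
  else
    let tf := (PySem.List.pyRange 5 (n + 1) 1).foldl fStep ([0, 0, 0, 0, 1], [0, 0, 0, 0, 0])
    if flag then PySem.List.pyGetD tf.1 n 0 else PySem.List.pyGetD tf.2 n 0

-- ===== PRECONDITION & SPEC =====
-- Pre_ excludes exactly n > 2000: there A's n -> n-2 recursion chain needs more than
-- CPython's default 1000 stack frames and A raises RecursionError (measured: A raises for
-- every n ≥ 2001 and returns for n ≤ 2000 under the default limit); no input on which A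
-- returns a value is excluded.
def Pre_f (n : Int) (flag : Bool) : Prop := n ≤ 2000
instance (n : Int) (flag : Bool) : Decidable (Pre_f n flag) := by unfold Pre_f; infer_instance
def pvWitness_f : Int × Bool := (10, true)

def Spec_f (n : Int) (flag : Bool) (out : Int) : Prop := out = f_alt n flag
instance (n : Int) (flag : Bool) (out : Int) : Decidable (Spec_f n flag out) := by unfold Spec_f; infer_instance

-- ===== CLAIM (what is proved, stated in full; the proofs are below) =====
def Claim_equal_f : Prop := ∀ (n : Int) (flag : Bool), Dom_f n flag → Pre_f n flag → Spec_f n flag (f n flag)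

-- ===== LEMMAS AND PROOFS =====

-- the intended content of the tables: T = tbl L true, F = tbl L false
def tbl (L : Nat) (fl : Bool) : List Int := (List.range L).map (fun k : Nat => f (k : Int) fl)

theorem f_lt4 (n : Int) (fl : Bool) (h : n < 4) : f n fl = 0 := by
  rw [f.eq_def]; simp [h]

theorem f_4_true : f 4 true = 1 := by
  rw [f.eq_def]; norm_num

theorem f_4_false : f 4 false = 0 := by
  have h2 : PySem.Int.floordiv 4 2 = 2 := by decide
  have h3 : PySem.Int.floordiv 4 3 = 1 := by decide
  rw [f.eq_def]
  norm_num [h2, h3]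
  rw [f_lt4 2 false (by norm_num), f_lt4 1 false (by norm_num)]
  norm_num

theorem fT_rec (m : Int) (h : 5 ≤ m) :
    f m true = f (m - 2) true + f (PySem.Int.floordiv m 2) true +
      f (PySem.Int.floordiv m 3) true := by
  rw [f.eq_def]
  simp [show ¬ m < 4 by omega, show m ≠ 4 by omega]

theorem fF_rec (m : Int) (h : 5 ≤ m) (h66 : m ≠ 66) :
    f m false = f (m - 2) false + f (PySem.Int.floordiv m 2) false +
      f (PySem.Int.floordiv m 3) false := by
  rw [f.eq_def]
  simp [show ¬ m < 4 by omega, h66]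

theorem fF_66 :
    f 66 false = f (66 - 2) true + f (PySem.Int.floordiv 66 2) true +
      f (PySem.Int.floordiv 66 3) true := by
  rw [f.eq_def]
  norm_num

theorem tbl_get_app (fl : Bool) (L : Nat) (i : Int) (ys : List Int)
    (h0 : 0 ≤ i) (hL : i < (L : Int)) :
    PySem.List.pyGetD (tbl L fl ++ ys) i 0 = f i fl := by
  have hlen : i < ((tbl L fl ++ ys).length : Int) := by
    simp [tbl]; omega
  rw [PySem.List.pyGetD_eq_getElem _ _ h0 hlen]
  have hi : i.toNat < L := by omega
  rw [List.getElem_append_left (by simpa [tbl] using hi)]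
  simp only [tbl, List.getElem_map, List.getElem_range]
  rw [Int.toNat_of_nonneg h0]

theorem tbl_get (fl : Bool) (L : Nat) (i : Int)
    (h0 : 0 ≤ i) (hL : i < (L : Int)) :
    PySem.List.pyGetD (tbl L fl) i 0 = f i fl := by
  have := tbl_get_app fl L i [] h0 hL
  simpa using this

theorem tbl_succ (L : Nat) (fl : Bool) : tbl (L + 1) fl = tbl L fl ++ [f (L : Int) fl] := by
  simp [tbl, List.range_succ]

theorem fStep_tbl (L : Nat) (hL : 5 ≤ L) :
    fStep (tbl L true, tbl L false) (L : Int) = (tbl (L + 1) true, tbl (L + 1) false) := by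
  have h0 : (0 : Int) ≤ (L : Int) - 2 := by omega
  have hlt : (L : Int) - 2 < (L : Int) := by omega
  have e2 : PySem.Int.floordiv (L : Int) 2 = (L : Int) / 2 :=
    PySem.Int.floordiv_eq_ediv_of_pos (by norm_num)
  have e3 : PySem.Int.floordiv (L : Int) 3 = (L : Int) / 3 :=
    PySem.Int.floordiv_eq_ediv_of_pos (by norm_num)
  have h02 : (0 : Int) ≤ PySem.Int.floordiv (L : Int) 2 := by rw [e2]; omega
  have hlt2 : PySem.Int.floordiv (L : Int) 2 < (L : Int) := by rw [e2]; omega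
  have h03 : (0 : Int) ≤ PySem.Int.floordiv (L : Int) 3 := by rw [e3]; omega
  have hlt3 : PySem.Int.floordiv (L : Int) 3 < (L : Int) := by rw [e3]; omega
  unfold fStep
  simp only
  rw [tbl_get true L _ h0 hlt, tbl_get true L _ h02 hlt2, tbl_get true L _ h03 hlt3]
  by_cases h66 : (L : Int) = 66
  · rw [if_pos h66]
    rw [tbl_get_app true L _ _ h0 hlt, tbl_get_app true L _ _ h02 hlt2,
        tbl_get_app true L _ _ h03 hlt3]
    rw [tbl_succ, tbl_succ, h66, fT_rec 66 (by norm_num), fF_66]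
  · rw [if_neg h66]
    rw [tbl_get false L _ h0 hlt, tbl_get false L _ h02 hlt2,
        tbl_get false L _ h03 hlt3]
    rw [tbl_succ, tbl_succ, fT_rec (L : Int) (by omega), fF_rec (L : Int) (by omega) h66]

theorem tbl_five_true : tbl 5 true = [0, 0, 0, 0, 1] := by
  simp only [tbl, List.range_succ, List.range_zero]
  simp [f_lt4 0 true (by norm_num), f_lt4 1 true (by norm_num), f_lt4 2 true (by norm_num),
        f_lt4 3 true (by norm_num), f_4_true]

theorem tbl_five_false : tbl 5 false = [0, 0, 0, 0, 0] := by
  simp only [tbl, List.range_succ, List.range_zero]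
  simp [f_lt4 0 false (by norm_num), f_lt4 1 false (by norm_num), f_lt4 2 false (by norm_num),
        f_lt4 3 false (by norm_num), f_4_false]

theorem fold_inv (j : Nat) :
    (List.range j).foldl (fun s (k : Nat) => fStep s (5 + (k : Int)))
        ([0, 0, 0, 0, 1], [0, 0, 0, 0, 0]) = (tbl (5 + j) true, tbl (5 + j) false) := by
  induction j with
  | zero => simp [tbl_five_true, tbl_five_false]
  | succ j ih =>
    rw [List.range_succ, List.foldl_append, ih]
    simp only [List.foldl_cons, List.foldl_nil]
    have : (5 : Int) + (j : Int) = ((5 + j : Nat) : Int) := by push_cast; ring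
    rw [this, fStep_tbl (5 + j) (by omega)]
    rfl

-- ===== VERDICT (by name: the statement is the Claim_ definition above) =====
theorem f_spec : Claim_equal_f := by
  intro n flag _ _
  unfold Spec_f f_alt
  by_cases h4 : n < 4
  · rw [if_pos h4, f_lt4 n flag h4]
  · rw [if_neg h4]
    have hn : (0 : Int) ≤ n := by omega
    set j : Nat := (n - 4).toNat with hj
    have hrange : PySem.List.pyRange 5 (n + 1) 1 =
        (List.range j).map (fun k : Nat => 5 + (k : Int)) := by
      rw [PySem.List.pyRange_one]
      have hj' : (n + 1 - 5).toNat = j := by omega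
      rw [hj']
    rw [hrange, List.foldl_map, fold_inv j]
    have hnlt : n < ((5 + j : Nat) : Int) := by omega
    cases flag with
    | false => simpa using (tbl_get false (5 + j) n hn hnlt).symm
    | true => simpa using (tbl_get true (5 + j) n hn hnlt).symm
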